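-- pv_equiv track=rewrite | github.com/jjob-spec/ingestkit | packages/ingestkit-pdf/src/ingestkit_pdf/utils/chunker.py | _get_heading_path
-- ===== SOURCE A (Python) =====
-- def _get_heading_path(
--     position: int, headings: list[tuple[int, str, int]]
-- ) -> list[str]:
--     """Return heading ancestry at a given character position.
--
--     Parameters
--     ----------
--     position:
--         Character offset in the document.
--     headings:
--         List of ``(level, title, char_offset)`` tuples sorted by offset.
--     """
--     stack: dict[int, str] = {}
--     for level, title, offset in headings:
--         if offset > position:
--             break
--         # Clear deeper levels when a higher-level heading appears
--         keys_to_remove = [k for k in stack if k >= level]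
--         for k in keys_to_remove:
--             del stack[k]
--         stack[level] = title
--     return [stack[k] for k in sorted(stack)]
-- ===== SOURCE B (Python) =====
-- def _get_heading_path(
--     position: int, headings: list[tuple[int, str, int]]
-- ) -> list[str]:
--     """Return heading ancestry at a given character position.
--
--     Backward-scan variant: take the prefix of headings at or before the
--     position, then scan it from the right keeping each heading whose level
--     is strictly below the running minimum level seen so far; those kept
--     headings, reversed back to document order, are exactly the ancestry.
--     """
--     n = 0
--     for _, _, off in headings:
--         if off > position:
--             break
--         n += 1
--     path = []
--     bound = None
--     for level, title, _ in reversed(headings[:n]):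
--         if bound is None or level < bound:
--             path.append(title)
--             bound = level
--     path.reverse()
--     return path
-- ===== Notes on version B (the rewrite author's own statement) =====
-- stated objective: alternative
-- what changed: Replaces the dict with per-heading key-deletion sweeps and a final key sort by a two-phase scan: cut the prefix of headings at or before the position, then a single backward pass keeping headings whose level is strictly below the running minimum, reversed back into document order.
import Mathlib
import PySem

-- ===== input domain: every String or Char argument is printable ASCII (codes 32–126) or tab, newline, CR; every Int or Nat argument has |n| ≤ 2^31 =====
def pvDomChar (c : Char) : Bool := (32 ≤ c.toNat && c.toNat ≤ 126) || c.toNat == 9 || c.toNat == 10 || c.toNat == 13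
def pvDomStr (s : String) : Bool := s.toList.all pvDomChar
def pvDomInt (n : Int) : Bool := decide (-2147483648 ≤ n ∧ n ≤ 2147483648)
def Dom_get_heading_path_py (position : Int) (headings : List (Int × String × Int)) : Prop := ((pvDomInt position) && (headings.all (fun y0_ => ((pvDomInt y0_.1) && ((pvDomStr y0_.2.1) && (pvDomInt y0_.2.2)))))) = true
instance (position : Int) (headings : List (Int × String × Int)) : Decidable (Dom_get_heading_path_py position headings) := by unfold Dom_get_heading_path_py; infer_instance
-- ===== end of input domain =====

-- B replaces A's dict (delete keys >= level, insert, sort keys at the end) by a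
-- two-phase scan: cut the prefix at or before the position, then one backward
-- pass keeping headings whose level is strictly below the running minimum.

-- ===== PORT A =====
-- the for-loop over headings with its break, state = the dict `stack`
def pvLoopA (position : Int) : List (Int × String × Int) → PySem.Dict Int String → PySem.Dict Int String
  | [], stack => stack
  | (level, title, offset) :: rest, stack =>
    if offset > position then stack
    else
      let keysToRemove := stack.keys.filter (fun k => decide (k ≥ level))
      let stack' := keysToRemove.foldl (fun d k => d.erase k) stack
      pvLoopA position rest (stack'.insert level title)

def get_heading_path_py (position : Int) (headings : List (Int × String × Int)) : List String :=
  let stack := pvLoopA position headings PySem.Dict.empty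
  -- stack[k] for k in sorted(stack); k always comes from the dict's keys, so get? is some
  (PySem.List.sorted stack.keys (fun k => k) false).map (fun k => (stack.get? k).getD "")

-- ===== PORT B =====
-- phase 1: the counting loop (`n += 1` until the first offset > position)
def pvPrefixLen (position : Int) : List (Int × String × Int) → Nat
  | [] => 0
  | (_, _, offset) :: rest =>
    if offset > position then 0 else pvPrefixLen position rest + 1

-- phase 2: the backward loop over reversed(headings[:n]), state = (bound, path)
def pvBack : List (Int × String × Int) → Option Int → List String → List String
  | [], _, path => path
  | (level, title, _) :: rest, bound, path =>
    if (match bound with | none => true | some b => decide (level < b)) then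
      pvBack rest (some level) (path ++ [title])
    else
      pvBack rest bound path

def get_heading_path_py_alt (position : Int) (headings : List (Int × String × Int)) : List String :=
  let n := pvPrefixLen position headings
  (pvBack (headings.take n).reverse none []).reverse

-- ===== PRECONDITION & SPEC =====
def Spec_get_heading_path_py (position : Int) (headings : List (Int × String × Int)) (out : List String) : Prop := out = get_heading_path_py_alt position headings
instance (position : Int) (headings : List (Int × String × Int)) (out : List String) : Decidable (Spec_get_heading_path_py position headings out) := by unfold Spec_get_heading_path_py; infer_instance

-- ===== CLAIM (what is proved, stated in full; the proofs are below) =====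
def Claim_equal_get_heading_path_py : Prop := ∀ (position : Int) (headings : List (Int × String × Int)), Dom_get_heading_path_py position headings → Spec_get_heading_path_py position headings (get_heading_path_py position headings)

-- ===== LEMMAS AND PROOFS =====

-- the common reference: one pass of A's loop body as a pure list step
def pvStep (s : List (Int × String)) (h : Int × String × Int) : List (Int × String) :=
  s.filter (fun p => decide (p.1 < h.1)) ++ [(h.1, h.2.1)]

-- erasing every key of K leaves exactly the items whose key is not in K
lemma pv_eraseFold_items (K : List Int) (d : PySem.Dict Int String) :
    (K.foldl (fun d k => d.erase k) d).items = d.items.filter (fun p => !(K.contains p.1)) := by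
  induction K generalizing d with
  | nil => simp
  | cons k K ih =>
    rw [List.foldl_cons, ih]
    show List.filter _ (List.filter _ d.items) = _
    rw [List.filter_filter]
    apply List.filter_congr
    intro p _
    by_cases h : p.1 = k <;> simp [h]

-- one iteration of A's loop body, on the items list, is pvStep
lemma pv_stepA_items (s : List (Int × String)) (level : Int) (title : String) (offset : Int) :
    ((((PySem.Dict.mk s).keys.filter (fun k => decide (k ≥ level))).foldl
        (fun d k => d.erase k) (PySem.Dict.mk s)).insert level title).items
      = pvStep s (level, title, offset) := by
  have hitems : (((PySem.Dict.mk s).keys.filter (fun k => decide (k ≥ level))).foldl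
      (fun d k => d.erase k) (PySem.Dict.mk s)).items = s.filter (fun p => decide (p.1 < level)) := by
    rw [pv_eraseFold_items]
    apply List.filter_congr
    intro p hp
    have hmem : p.1 ∈ (PySem.Dict.mk s).keys := List.mem_map_of_mem hp
    by_cases hle : level ≤ p.1
    · have hnlt : ¬ p.1 < level := by omega
      simp only [List.contains_eq_mem, hnlt, decide_false]
      simp
      exact ⟨⟨p.2, hp⟩, hle⟩
    · have hlt : p.1 < level := by omega
      simp only [List.contains_eq_mem, hlt, decide_true]
      simp
      intro x hx
      omega
  have hnc : (((PySem.Dict.mk s).keys.filter (fun k => decide (k ≥ level))).foldl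
      (fun d k => d.erase k) (PySem.Dict.mk s)).contains level = false := by
    simp only [PySem.Dict.contains, hitems, List.any_eq_false]
    intro p hp
    have := (List.mem_filter.mp hp).2
    simp only [decide_eq_true_eq] at this
    simp only [beq_iff_eq]
    omega
  rw [PySem.Dict.insert, hnc]
  simp only [Bool.false_eq_true, if_false]
  show _ ++ _ = _
  rw [hitems]
  rfl

-- A's loop is the pvStep fold over the prefix cut by pvPrefixLen
lemma pv_loopA_eq_fold (position : Int) (hs : List (Int × String × Int)) :
    ∀ s : List (Int × String),
      (pvLoopA position hs (PySem.Dict.mk s)).items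
        = (hs.take (pvPrefixLen position hs)).foldl pvStep s := by
  induction hs with
  | nil => intro s; simp [pvLoopA, pvPrefixLen]
  | cons h rest ih =>
    obtain ⟨level, title, offset⟩ := h
    intro s
    by_cases hbr : offset > position
    · simp [pvLoopA, pvPrefixLen, hbr]
    · simp only [pvLoopA, if_neg hbr, pvPrefixLen]
      have hA : (((PySem.Dict.mk s).keys.filter (fun k => decide (k ≥ level))).foldl
          (fun d k => d.erase k) (PySem.Dict.mk s)).insert level title
          = PySem.Dict.mk (pvStep s (level, title, offset)) := by
        apply PySem.Dict.ext
        exact pv_stepA_items s level title offset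
      rw [hA, ih]
      simp

-- the fold's state stays strictly level-sorted
lemma pv_fold_sorted (P : List (Int × String × Int)) :
    ∀ s : List (Int × String), ((s.map Prod.fst).Pairwise (· < ·)) →
      (((P.foldl pvStep s).map Prod.fst).Pairwise (· < ·)) := by
  induction P with
  | nil => intro s hs; exact hs
  | cons h rest ih =>
    intro s hs
    rw [List.foldl_cons]
    apply ih
    unfold pvStep
    rw [List.map_append, List.pairwise_append]
    refine ⟨hs.sublist (List.Sublist.map Prod.fst List.filter_sublist), by simp, ?_⟩
    intro a ha b hb
    simp only [List.mem_map] at ha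
    obtain ⟨q, hq, rfl⟩ := ha
    have := (List.mem_filter.mp hq).2
    simp only [decide_eq_true_eq] at this
    simp only [List.map_cons, List.map_nil, List.mem_singleton] at hb
    omega

-- the bound of B's backward scan, as a filter on the fold's result
def pvFiltB : Option Int → List (Int × String) → List (Int × String)
  | none, s => s
  | some b, s => s.filter (fun p => decide (p.1 < b))

lemma pvBack_cons (level : Int) (title : String) (offset : Int)
    (rest : List (Int × String × Int)) (bound : Option Int) (path : List String) :
    pvBack ((level, title, offset) :: rest) bound path
      = if (match bound with | none => true | some b => decide (level < b)) then
          pvBack rest (some level) (path ++ [title])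
        else
          pvBack rest bound path := rfl

-- B's backward scan reads off the fold's result (filtered by the bound), reversed
lemma pv_back_eq_fold (P : List (Int × String × Int)) :
    ∀ (bound : Option Int) (acc : List String),
      pvBack P.reverse bound acc
        = acc ++ ((pvFiltB bound (P.foldl pvStep [])).map Prod.snd).reverse := by
  induction P using List.reverseRecOn with
  | nil => intro bound acc; cases bound <;> simp [pvBack, pvFiltB]
  | append_singleton Q h ih =>
    obtain ⟨level, title, offset⟩ := h
    intro bound acc
    rw [List.reverse_append]
    simp only [List.reverse_singleton, List.singleton_append]
    rw [List.foldl_append, List.foldl_cons, List.foldl_nil]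
    have hstep : pvStep (Q.foldl pvStep []) (level, title, offset)
        = (Q.foldl pvStep []).filter (fun p => decide (p.1 < level)) ++ [(level, title)] := rfl
    rw [pvBack_cons]
    cases hb : (match bound with | none => true | some b => decide (level < b)) with
    | true =>
      rw [if_pos rfl, ih (some level) (acc ++ [title])]
      have hkeep : pvFiltB bound (pvStep (Q.foldl pvStep []) (level, title, offset))
          = (Q.foldl pvStep []).filter (fun p => decide (p.1 < level)) ++ [(level, title)] := by
        cases bound with
        | none => exact hstep
        | some x =>
          have hlx : level < x := by simpa using hb
          rw [hstep]
          simp only [pvFiltB]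
          rw [List.filter_append, List.filter_filter]
          have h1 : (fun a : Int × String => decide (a.1 < x) && decide (a.1 < level))
              = (fun a : Int × String => decide (a.1 < level)) := by
            funext p
            by_cases hp : p.1 < level
            · have hpx : p.1 < x := by omega
              simp [hp, hpx]
            · simp [hp]
          have h2 : decide (level < x) = true := by simpa using hlx
          simp [h1, h2]
      rw [hkeep]
      simp [pvFiltB]
    | false =>
      rw [if_neg (by simp), ih bound acc]
      congr 2
      cases bound with
      | none => simp at hb
      | some x =>
        have hxl : x ≤ level := by
          have := of_decide_eq_false hb
          omega
        rw [hstep]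
        simp only [pvFiltB]
        rw [List.filter_append, List.filter_filter]
        have h1 : (fun a : Int × String => decide (a.1 < x) && decide (a.1 < level))
            = (fun a : Int × String => decide (a.1 < x)) := by
          funext p
          by_cases hp : p.1 < x
          · have hpl : p.1 < level := by omega
            simp [hp, hpl]
          · simp [hp]
        have h2 : decide (level < x) = false := by simp; omega
        simp [h1, h2]

-- the final comprehension of A: sorted(keys) is keys, and the lookups read off the values
lemma pv_final (d : PySem.Dict Int String)
    (hs : (d.items.map Prod.fst).Pairwise (· < ·)) :
    (PySem.List.sorted d.keys (fun k => k) false).map (fun k => (d.get? k).getD "")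
      = d.items.map (fun p => p.2) := by
  have hkeys : d.keys = d.items.map Prod.fst := rfl
  have hnd : d.keys.Nodup := by
    rw [hkeys]; exact hs.nodup
  have hsorted : PySem.List.sorted d.keys (fun k => k) false = d.keys := by
    apply PySem.List.sorted_eq_self_of_pairwise
    rw [hkeys]
    exact hs.imp (fun h => le_of_lt h)
  rw [hsorted]
  have hvals := PySem.Dict.values_eq_map_keys d hnd ""
  have hmap : d.keys.map (fun k => (d.get? k).getD "") = d.keys.map (fun k => d.getD k "") := by
    apply List.map_congr_left
    intro k _
    rw [PySem.Dict.getD_eq_get?_getD]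
  rw [hmap, ← hvals]
  rfl

-- ===== VERDICT (by name: the statement is the Claim_ definition above) =====
theorem get_heading_path_py_spec : Claim_equal_get_heading_path_py := by
  intro position headings _
  unfold Spec_get_heading_path_py get_heading_path_py get_heading_path_py_alt
  have hempty : (PySem.Dict.empty : PySem.Dict Int String) = PySem.Dict.mk [] := rfl
  rw [hempty]
  have hA := pv_loopA_eq_fold position headings []
  have hsorted := pv_fold_sorted (headings.take (pvPrefixLen position headings))
    ([] : List (Int × String)) (by simp)
  have hfin := pv_final (pvLoopA position headings (PySem.Dict.mk []))
    (by rw [hA]; exact hsorted)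
  have hB := pv_back_eq_fold (headings.take (pvPrefixLen position headings)) none []
  simp only [hfin, hA, hB, pvFiltB, List.nil_append, List.reverse_reverse]
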